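-- pv_equiv track=rewrite | github.com/mshokrnezhad/ARC | blocks.py | draw_border
-- ===== SOURCE A (Python) =====
-- def draw_border(grid, border_value):
--     """
--     Input:
--     A two-dimensional grid (list of lists) where each cell contains either zero or a positive integer.
--     Zero represents an empty cell, and positive integers represent different objects (e.g., different colors or identifiers).
--     An integer representing the value to be used for the border.
--
--     Functionality:
--     The `draw_border` function adds a border around the input grid using the specified border value.
--     The border is one cell wide and surrounds the entire grid.
--
--     Output:
--     A new two-dimensional grid with the border added.
--
--     Example Input:
--     grid = [
--         [1, 2, 3],
--         [4, 5, 6],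
--         [7, 8, 9]
--     ]
--     border_value = 9
--
--     Example Output:
--     [
--         [9, 9, 9, 9, 9],
--         [9, 1, 2, 3, 9],
--         [9, 4, 5, 6, 9],
--         [9, 7, 8, 9, 9],
--         [9, 9, 9, 9, 9]
--     ]
--
--     Explanation:
--     - The input grid is surrounded by a border of value '9' to produce the output grid.
--     """
--
--     height = len(grid)
--     width = len(grid[0]) if height > 0 else 0
--
--     # Create a new grid with the border
--     new_grid = [[border_value] * (width + 2) for _ in range(height + 2)]
--
--     # Copy the original grid into the new grid
--     for i in range(height):
--         for j in range(width):
--             new_grid[i + 1][j + 1] = grid[i][j]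
--
--     return new_grid
-- ===== SOURCE B (Python) =====
-- def draw_border(grid, border_value):
--     # Assemble each output row directly: border row, then [bv] + copied cells + [bv] per source row.
--     width = len(grid[0]) if grid else 0
--     brow = [border_value] * (width + 2)
--     return ([brow]
--             + [[border_value] + row[:width] + [border_value] for row in grid]
--             + [list(brow)])
-- ===== Notes on version B (the rewrite author's own statement) =====
-- stated objective: simpler
-- what changed: B assembles the bordered grid directly by concatenation (border row + per-row [bv]+cells+[bv] + border row) instead of pre-filling a (h+2)x(w+2) grid of border values and overwriting the interior cell by cell; the per-cell indexed assignment loop disappears.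
import Mathlib
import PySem

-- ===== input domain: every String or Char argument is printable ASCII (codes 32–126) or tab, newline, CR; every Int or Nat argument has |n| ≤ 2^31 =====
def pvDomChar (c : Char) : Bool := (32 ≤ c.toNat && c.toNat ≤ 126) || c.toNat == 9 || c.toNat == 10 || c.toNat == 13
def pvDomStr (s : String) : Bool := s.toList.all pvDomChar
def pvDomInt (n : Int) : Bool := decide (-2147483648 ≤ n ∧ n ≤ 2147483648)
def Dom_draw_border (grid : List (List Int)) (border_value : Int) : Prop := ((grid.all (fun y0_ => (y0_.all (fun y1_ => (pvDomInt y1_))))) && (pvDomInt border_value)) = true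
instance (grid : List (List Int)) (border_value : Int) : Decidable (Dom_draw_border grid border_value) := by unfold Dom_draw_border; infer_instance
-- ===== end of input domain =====

-- B assembles the bordered grid directly by concatenation (border row + per-row [bv]+cells+[bv] + border row)
-- instead of pre-filling a (h+2)×(w+2) grid of border values and overwriting the interior cell by cell (objective: simpler).

-- ===== PORT A =====
def draw_border (grid : List (List Int)) (border_value : Int) : List (List Int) :=
  let height : Int := grid.length
  let width : Int := if height > 0 then (((PySem.List.pyGet? grid 0).getD []).length : Int) else 0
  let new_grid : List (List Int) :=
    (PySem.List.pyRange 0 (height + 2) 1).map (fun _ => List.replicate (width + 2).toNat border_value)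
  (PySem.List.pyRange 0 height 1).foldl (fun ng i =>
      (PySem.List.pyRange 0 width 1).foldl (fun ng j =>
          PySem.List.pySetD ng (i + 1)
            (PySem.List.pySetD (PySem.List.pyGetD ng (i + 1) []) (j + 1)
              (PySem.List.pyGetD (PySem.List.pyGetD grid i []) j 0))) ng)
    new_grid

-- ===== PORT B =====
def draw_border_alt (grid : List (List Int)) (border_value : Int) : List (List Int) :=
  let width : Nat := match grid with | [] => 0 | r :: _ => r.length
  let brow : List Int := List.replicate (width + 2) border_value
  [brow] ++ grid.map (fun row => [border_value] ++ row.take width ++ [border_value]) ++ [brow]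

-- ===== PRECONDITION & SPEC =====
-- Pre_ excludes exactly the ragged grids on which A raises IndexError: a row shorter than the
-- first row makes grid[i][j] go out of range in A's copy loop.
def Pre_draw_border (grid : List (List Int)) (border_value : Int) : Prop :=
  ∀ r ∈ grid, (grid.headD []).length ≤ r.length
instance (grid : List (List Int)) (border_value : Int) : Decidable (Pre_draw_border grid border_value) := by
  unfold Pre_draw_border; infer_instance
def pvWitness_draw_border : List (List Int) × Int := ([[1, 2], [3, 4], [5, 6]], 9)

def Spec_draw_border (grid : List (List Int)) (border_value : Int) (out : List (List Int)) : Prop := out = draw_border_alt grid border_value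
instance (grid : List (List Int)) (border_value : Int) (out : List (List Int)) : Decidable (Spec_draw_border grid border_value out) := by unfold Spec_draw_border; infer_instance

-- ===== CLAIM (what is proved, stated in full; the proofs are below) =====
def Claim_equal_draw_border : Prop := ∀ (grid : List (List Int)) (border_value : Int), Dom_draw_border grid border_value → Pre_draw_border grid border_value → Spec_draw_border grid border_value (draw_border grid border_value)
-- ===== LEMMAS AND PROOFS =====

-- The inner j-loop only rewrites row p of ng: pull the row update out of the list update.
lemma foldl_set_row (js : List Int) (v : Int → Int) (p : Nat) :
    ∀ ng : List (List Int), p < ng.length →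
    js.foldl (fun ng j =>
        PySem.List.pySetD ng ((p : Nat) : Int)
          (PySem.List.pySetD (PySem.List.pyGetD ng ((p : Nat) : Int) []) (j + 1) (v j))) ng
      = ng.set p
          (js.foldl (fun r j => PySem.List.pySetD r (j + 1) (v j))
            (PySem.List.pyGetD ng ((p : Nat) : Int) [])) := by
  induction js with
  | nil =>
      intro ng hlen
      simp only [List.foldl_nil, PySem.List.pyGetD_natCast,
        List.getD_eq_getElem ng [] hlen]
      exact (List.set_getElem_self hlen).symm
  | cons j js ih =>
      intro ng hlen
      simp only [List.foldl_cons, PySem.List.pySetD_natCast, PySem.List.pyGetD_natCast]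
      have hlen' : p < (ng.set p (PySem.List.pySetD (ng.getD p []) (j + 1) (v j))).length := by
        simpa using hlen
      have hx : (ng.set p (PySem.List.pySetD (ng.getD p []) (j + 1) (v j))).getD p []
          = PySem.List.pySetD (ng.getD p []) (j + 1) (v j) := by
        rw [List.getD_eq_getElem _ [] hlen']
        exact List.getElem_set_self hlen'
      have hmain := ih (ng.set p (PySem.List.pySetD (ng.getD p []) (j + 1) (v j))) hlen'
      simp only [PySem.List.pyGetD_natCast, PySem.List.pySetD_natCast, hx] at hmain
      rw [hmain, List.set_set]

-- The row fold fills positions 1..k of the border row with row's first k cells.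
lemma row_fill (row : List Int) (bv : Int) (W : Nat) (hW : W ≤ row.length) :
    ∀ k : Nat, k ≤ W →
      (PySem.List.pyRange 0 (k : Int) 1).foldl
          (fun r j => PySem.List.pySetD r (j + 1) (PySem.List.pyGetD row j 0))
          (List.replicate (W + 2) bv)
        = bv :: (row.take k ++ (List.replicate (W - k) bv ++ [bv])) := by
  intro k hk
  induction k with
  | zero =>
      rw [show ((0 : Nat) : Int) = 0 by norm_num, PySem.List.pyRange_one_eq_nil (by omega)]
      simp only [List.foldl_nil, List.take_zero, List.nil_append, Nat.sub_zero]
      rw [show W + 2 = (W + 1) + 1 from rfl, List.replicate_succ,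
          List.replicate_succ' (n := W)]
  | succ k ih =>
      have hkl : k < row.length := by omega
      rw [show ((k + 1 : Nat) : Int) = (k : Int) + 1 by push_cast; ring,
          PySem.List.pyRange_one_succ_right (by positivity), List.foldl_append,
          ih (by omega)]
      simp only [List.foldl_cons, List.foldl_nil]
      rw [show ((k : Int) + 1) = ((k + 1 : Nat) : Int) by push_cast; ring]
      rw [PySem.List.pySetD_natCast, PySem.List.pyGetD_natCast,
          List.getD_eq_getElem row 0 hkl]
      have hlen : (row.take k).length = k := by simp; omega
      rw [List.set_cons_succ, List.set_append_right _ _ (by omega)]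
      have hrep : List.replicate (W - k) bv ++ [bv]
          = bv :: (List.replicate (W - (k + 1)) bv ++ [bv]) := by
        rw [show W - k = (W - (k + 1)) + 1 by omega, List.replicate_succ]; simp
      rw [hrep]
      simp only [hlen, Nat.sub_self, List.set_cons_zero]
      have htake : row.take (k + 1) = row.take k ++ [row[k]] := by
        rw [List.take_add_one]; simp [hkl]
      rw [htake, List.append_assoc]
      simp

-- The outer fold: after k iterations, rows 1..k hold the bordered copies of grid's first k rows.
lemma outer_fill (grid : List (List Int)) (bv : Int) (W : Nat)
    (hW : ∀ r ∈ grid, W ≤ r.length) :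
    ∀ k : Nat, k ≤ grid.length →
      (PySem.List.pyRange 0 (k : Int) 1).foldl
          (fun ng i =>
            (PySem.List.pyRange 0 (W : Int) 1).foldl
              (fun ng j =>
                PySem.List.pySetD ng (i + 1)
                  (PySem.List.pySetD (PySem.List.pyGetD ng (i + 1) []) (j + 1)
                    (PySem.List.pyGetD (PySem.List.pyGetD grid i []) j 0))) ng)
          (List.replicate (grid.length + 2) (List.replicate (W + 2) bv))
        = List.replicate (W + 2) bv ::
            ((grid.take k).map (fun row => bv :: (row.take W ++ [bv])) ++
              (List.replicate (grid.length - k) (List.replicate (W + 2) bv) ++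
                [List.replicate (W + 2) bv])) := by
  intro k hk
  induction k with
  | zero =>
      rw [show PySem.List.pyRange 0 ((0 : Nat) : Int) 1 = [] from
            PySem.List.pyRange_one_eq_nil (by simp)]
      simp only [List.foldl_nil, List.take_zero, List.map_nil, List.nil_append, Nat.sub_zero]
      rw [show grid.length + 2 = (grid.length + 1) + 1 from rfl, List.replicate_succ,
          List.replicate_succ' (n := grid.length)]
  | succ k ih =>
      have hkg : k < grid.length := by omega
      rw [show ((k + 1 : Nat) : Int) = (k : Int) + 1 by push_cast; ring,
          PySem.List.pyRange_one_succ_right (by positivity), List.foldl_append,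
          ih (by omega)]
      simp only [List.foldl_cons, List.foldl_nil]
      rw [show ((k : Int) + 1) = ((k + 1 : Nat) : Int) by push_cast; ring]
      have hAlen : ((grid.take k).map (fun row => bv :: (row.take W ++ [bv]))).length = k := by
        simp; omega
      have hrep : List.replicate (grid.length - k) (List.replicate (W + 2) bv)
            ++ [List.replicate (W + 2) bv]
          = List.replicate (W + 2) bv ::
              (List.replicate (grid.length - (k + 1)) (List.replicate (W + 2) bv)
                ++ [List.replicate (W + 2) bv]) := by
        rw [show grid.length - k = (grid.length - (k + 1)) + 1 by omega,
            List.replicate_succ]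
        simp
      rw [hrep]
      rw [foldl_set_row _ _ (k + 1) _ (by simp; omega)]
      have hrowk : PySem.List.pyGetD (List.replicate (W + 2) bv ::
            ((grid.take k).map (fun row => bv :: (row.take W ++ [bv])) ++
              (List.replicate (W + 2) bv ::
                (List.replicate (grid.length - (k + 1)) (List.replicate (W + 2) bv)
                  ++ [List.replicate (W + 2) bv]))))
            ((k + 1 : Nat) : Int) [] = List.replicate (W + 2) bv := by
        rw [PySem.List.pyGetD_natCast, List.getD_eq_getElem?_getD, List.getElem?_cons_succ,
            List.getElem?_append_right (by omega), hAlen, Nat.sub_self]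
        rfl
      have hgetk : PySem.List.pyGetD grid (k : Int) [] = grid[k] := by
        rw [PySem.List.pyGetD_natCast, List.getD_eq_getElem grid [] hkg]
      rw [hrowk, hgetk, row_fill grid[k] bv W (hW _ (by simp)) W (le_refl W)]
      simp only [Nat.sub_self, List.replicate_zero, List.nil_append]
      rw [List.set_cons_succ, List.set_append_right _ _ (by omega), hAlen, Nat.sub_self,
          List.set_cons_zero]
      have htake : grid.take (k + 1) = grid.take k ++ [grid[k]] := by
        rw [List.take_add_one]; simp [hkg]
      rw [htake, List.map_append]
      simp

-- ===== VERDICT (by name: the statement is the Claim_ definition above) =====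
theorem draw_border_spec : Claim_equal_draw_border := by
  intro grid border_value _ hpre
  unfold Spec_draw_border draw_border draw_border_alt
  cases grid with
  | nil =>
      simp only [List.length_nil, Nat.cast_zero]
      norm_num
      rw [show Int.toNat 2 = 2 from rfl]
      simp [List.replicate]
  | cons r0 rest =>
      set G := r0 :: rest with hG
      have hh : (0 : Int) < (G.length : Int) := by simp [hG]
      simp only [if_pos (by exact_mod_cast hh : (G.length : Int) > 0)]
      rw [show PySem.List.pyGet? G 0 = some r0 from PySem.List.pyGet?_zero_cons r0 rest]
      simp only [Option.getD_some]
      have hW : ∀ r ∈ G, r0.length ≤ r.length := by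
        intro r hr
        have := hpre r hr
        simpa [hG] using this
      have hcast2 : ((r0.length : Int) + 2).toNat = r0.length + 2 := by omega
      have hmap : (PySem.List.pyRange 0 ((G.length : Int) + 2) 1).map
            (fun _ => List.replicate ((r0.length : Int) + 2).toNat border_value)
          = List.replicate (G.length + 2) (List.replicate (r0.length + 2) border_value) := by
        rw [hcast2, List.map_const']
        congr 1
        rw [PySem.List.length_pyRange_one]
        omega
      rw [hmap, outer_fill G border_value r0.length hW G.length (le_refl _)]
      simp [hG]
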